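-- pv_equiv track=rewrite | github.com/m3xw3ll/LeetCode | Algorithms/snippets/2405_optimal_partition_of_string.py | partitions_string
-- ===== SOURCE A (Python) =====
-- def partitions_string(s):
--     tmp = set()
--     cnt = 1
--     for c in s:
--         if c in tmp:
--             cnt += 1
--             tmp = set()
--         tmp.add(c)
--     return cnt
-- ===== SOURCE B (Python) =====
-- def partitions_string(s):
--     cnt = 1
--     while True:
--         # length of the longest prefix of s whose characters are all distinct,
--         # detected by comparing the cardinality of set(prefix) with its length
--         k = 0
--         while k < len(s) and len(set(s[:k + 1])) == k + 1:
--             k += 1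
--         if k == len(s):
--             return cnt
--         # s[k] repeats inside s[:k]: cut here and continue on the rest
--         cnt += 1
--         s = s[k:]
-- ===== Notes on version B (the rewrite author's own statement) =====
-- stated objective: alternative
-- what changed: Replaced A's single-pass fold with a reset character set by an outer loop that repeatedly finds the longest all-distinct prefix (comparing len(set(prefix)) with its length) and cuts the string there.
import Mathlib
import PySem

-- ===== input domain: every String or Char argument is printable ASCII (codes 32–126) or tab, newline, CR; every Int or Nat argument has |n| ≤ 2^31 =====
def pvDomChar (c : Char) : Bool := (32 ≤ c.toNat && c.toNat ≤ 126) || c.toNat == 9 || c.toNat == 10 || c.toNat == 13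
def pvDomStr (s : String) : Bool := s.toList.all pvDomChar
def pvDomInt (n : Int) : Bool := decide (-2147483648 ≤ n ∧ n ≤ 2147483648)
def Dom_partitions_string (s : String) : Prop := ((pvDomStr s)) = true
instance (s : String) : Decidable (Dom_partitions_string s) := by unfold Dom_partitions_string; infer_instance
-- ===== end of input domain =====

-- B replaces A's one-pass fold (set reset on repeat) by recursion: cut off the
-- longest all-distinct prefix (found via a cardinality test) and recurse on the rest.
-- ===== PORT A =====
def partitions_string (s : String) : Int :=
  (s.toList.foldl
    (fun (st : PySem.Set Char × Int) c =>
      if PySem.Set.contains st.1 c then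
        (PySem.Set.add PySem.Set.empty c, st.2 + 1)
      else
        (PySem.Set.add st.1 c, st.2))
    (PySem.Set.empty, 1)).2

-- ===== PORT B =====
-- 'while k < len(s) and len(set(s[:k+1])) == k+1: k += 1', fuel = remaining iterations (totality guard only)
def pvFindK (l : List Char) : Nat → Nat → Nat
  | 0, k => k
  | fuel + 1, k =>
    if k < l.length ∧ (PySem.Set.ofList (l.take (k + 1))).length = k + 1 then
      pvFindK l fuel (k + 1)
    else k

-- the outer 'while True' loop: cnt is the accumulator, fuel = length bound (totality guard only)
def pvPartsB : Nat → List Char → Int → Int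
  | 0, _, cnt => cnt
  | fuel + 1, l, cnt =>
    let k := pvFindK l l.length 0
    if k = l.length then cnt else pvPartsB fuel (l.drop k) (cnt + 1)

def partitions_string_alt (s : String) : Int := pvPartsB s.toList.length s.toList 1

-- ===== PRECONDITION & SPEC =====
def Spec_partitions_string (s : String) (out : Int) : Prop := out = partitions_string_alt s
instance (s : String) (out : Int) : Decidable (Spec_partitions_string s out) := by unfold Spec_partitions_string; infer_instance

-- ===== CLAIM (what is proved, stated in full; the proofs are below) =====
def Claim_equal_partitions_string : Prop := ∀ (s : String), Dom_partitions_string s → Spec_partitions_string s (partitions_string s)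

-- ===== LEMMAS AND PROOFS =====

-- len(set(xs)) == len(xs) exactly when xs has no duplicates
lemma length_ofList_eq_iff (xs : List Char) :
    (PySem.Set.ofList xs).length = xs.length ↔ xs.Nodup := by
  induction xs using List.reverseRecOn with
  | nil => simp [PySem.Set.ofList_nil]
  | append_singleton xs x ih =>
    rw [PySem.Set.ofList_append_singleton]
    by_cases hx : x ∈ xs
    · have hmem : x ∈ PySem.Set.ofList xs := (PySem.Set.mem_ofList _ _).mpr hx
      rw [PySem.Set.add_of_mem hmem]
      have hle := PySem.Set.length_ofList_le (xs := xs)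
      simp only [List.length_append, List.length_singleton]
      constructor
      · intro h; omega
      · intro h
        exact absurd hx (by simp [List.nodup_append] at h; tauto)
    · have hmem : x ∉ PySem.Set.ofList xs := fun h => hx ((PySem.Set.mem_ofList _ _).mp h)
      rw [PySem.Set.add_of_not_mem hmem]
      simp only [List.length_append, List.length_singleton]
      constructor
      · intro h
        have hnd := ih.mp (by omega)
        simp only [List.nodup_append, List.nodup_singleton, true_and]
        refine ⟨hnd, ?_⟩
        intro a ha b hb heq
        have hb' : b = x := by simpa using hb
        exact hx ((heq.trans hb') ▸ ha)
      · intro h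
        have hnd : xs.Nodup := by simp [List.nodup_append] at h; tauto
        have := ih.mpr hnd
        omega

lemma pvFindK_ge (l : List Char) : ∀ (fuel k : Nat), k ≤ pvFindK l fuel k := by
  intro fuel
  induction fuel with
  | zero => intro k; simp [pvFindK]
  | succ n ih =>
    intro k
    rw [pvFindK]
    split
    · exact le_trans (Nat.le_succ k) (ih (k + 1))
    · exact le_refl k

-- what the while loop computes: its result r keeps a duplicate-free prefix, stays in
-- range, and stops either at the end or at a character repeating in that prefix
lemma pvFindK_spec (l : List Char) :
    ∀ (fuel k : Nat), l.length ≤ k + fuel → k ≤ l.length → (l.take k).Nodup →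
      pvFindK l fuel k ≤ l.length ∧
      (l.take (pvFindK l fuel k)).Nodup ∧
      (∀ hr : pvFindK l fuel k < l.length,
        l[pvFindK l fuel k] ∈ l.take (pvFindK l fuel k)) := by
  intro fuel
  induction fuel with
  | zero =>
    intro k hfu hkle hnd
    refine ⟨by simpa [pvFindK] using hkle, by simpa [pvFindK] using hnd, ?_⟩
    intro hr
    rw [pvFindK] at hr
    omega
  | succ n ih =>
    intro k hfu hkle hnd
    rw [pvFindK]
    by_cases hc : k < l.length ∧ (PySem.Set.ofList (l.take (k + 1))).length = k + 1
    · rw [if_pos hc]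
      have hlen : (l.take (k + 1)).length = k + 1 :=
        List.length_take_of_le (by omega)
      have hnd' : (l.take (k + 1)).Nodup :=
        (length_ofList_eq_iff _).mp (by rw [hlen]; exact hc.2)
      exact ih (k + 1) (by omega) (by omega) hnd'
    · rw [if_neg hc]
      refine ⟨hkle, hnd, fun hr => ?_⟩
      have hndup : ¬ (l.take (k + 1)).Nodup := by
        intro h
        exact hc ⟨hr, by
          rw [(length_ofList_eq_iff _).mpr h]
          exact List.length_take_of_le (by omega)⟩
      have hsucc : l.take (k + 1) = l.take k ++ [l[k]] := by
        rw [List.take_add_one, List.getElem?_eq_getElem hr]; rfl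
      rw [hsucc] at hndup
      by_contra hmem
      refine hndup (List.nodup_append.mpr ⟨hnd, List.nodup_singleton _, ?_⟩)
      intro a ha b hb heq
      have hb' : b = l[k] := by simpa using hb
      exact hmem ((heq.trans hb') ▸ ha)

lemma pvFindK_cons_pos (c : Char) (l' : List Char) :
    1 ≤ pvFindK (c :: l') (c :: l').length 0 := by
  have h : pvFindK (c :: l') (c :: l').length 0
      = pvFindK (c :: l') l'.length 1 := by
    rw [List.length_cons, pvFindK, if_pos]
    refine ⟨by simp, ?_⟩
    have ht : List.take (0 + 1) (c :: l') = [c] := rfl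
    rw [ht]
    rw [PySem.Set.ofList_eq_self_of_nodup (xs := [c]) (List.nodup_singleton c)]
    rfl
  rw [h]; exact pvFindK_ge _ _ 1

-- A's loop step
def pvStepA (st : PySem.Set Char × Int) (c : Char) : PySem.Set Char × Int :=
  if PySem.Set.contains st.1 c then
    (PySem.Set.add PySem.Set.empty c, st.2 + 1)
  else
    (PySem.Set.add st.1 c, st.2)

lemma partitions_string_eq_foldA (s : String) :
    partitions_string s = (s.toList.foldl pvStepA (PySem.Set.empty, 1)).2 := rfl

-- over a duplicate-free block disjoint from tmp, A's loop only accumulates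
lemma foldA_nodup (pre : List Char) :
    ∀ (tmp : PySem.Set Char) (cnt : Int), pre.Nodup → (∀ c ∈ pre, c ∉ tmp) →
      pre.foldl pvStepA (tmp, cnt) = (PySem.Set.update tmp pre, cnt) := by
  induction pre with
  | nil => intro tmp cnt _ _; simp [PySem.Set.update]
  | cons c pre' ih =>
    intro tmp cnt hnd hdis
    have hc : c ∉ tmp := hdis c (List.mem_cons_self)
    have hstep : pvStepA (tmp, cnt) c = (PySem.Set.add tmp c, cnt) := by
      unfold pvStepA
      rw [if_neg]
      simp only [PySem.Set.contains_eq_listContains]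
      simpa using hc
    rw [List.foldl_cons, hstep, PySem.Set.update_cons]
    exact ih (PySem.Set.add tmp c) cnt (List.Nodup.of_cons hnd)
      (fun d hd => by
        rw [PySem.Set.mem_add]
        rintro (h | h)
        · exact hdis d (List.mem_cons_of_mem c hd) h
        · exact (List.nodup_cons.mp hnd).1 (h ▸ hd))

-- main agreement: A's fold from a fresh set equals B's outer loop from the same count
lemma foldA_eq_partsB : ∀ (fuel : Nat) (l : List Char), l.length ≤ fuel → ∀ (cnt : Int),
    (l.foldl pvStepA (PySem.Set.empty, cnt)).2 = pvPartsB fuel l cnt := by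
  intro fuel
  induction fuel with
  | zero =>
    intro l hl cnt
    have : l = [] := List.eq_nil_of_length_eq_zero (by omega)
    subst this
    simp [pvPartsB]
  | succ n ih =>
    intro l hl cnt
    obtain ⟨hkle, hnd, hrep⟩ :=
      pvFindK_spec l l.length 0 (by omega) (Nat.zero_le _) (by simp)
    set k := pvFindK l l.length 0 with hkdef
    by_cases hke : k = l.length
    · -- whole string duplicate-free: one partition
      have hlnd : l.Nodup := by rw [← List.take_length (l := l), ← hke]; exact hnd
      have := foldA_nodup l PySem.Set.empty cnt hlnd
        (fun c _ => by simp [PySem.Set.empty])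
      rw [this, pvPartsB, ← hkdef, if_pos hke]
    · -- cut at the first repeated character and recurse
      have hklt : k < l.length := by omega
      have hk1 : 1 ≤ k := by
        rcases l with _ | ⟨c, l'⟩
        · simp at hklt
        · exact pvFindK_cons_pos c l'
      have hsplit : l = l.take k ++ l[k] :: l.drop (k + 1) := by
        conv_lhs => rw [← List.take_append_drop k l]
        rw [List.drop_eq_getElem_cons hklt]
      have hS : (l.take k).foldl pvStepA (PySem.Set.empty, cnt)
          = (PySem.Set.update PySem.Set.empty (l.take k), cnt) :=
        foldA_nodup (l.take k) PySem.Set.empty cnt hnd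
          (fun c _ => by simp [PySem.Set.empty])
      have hmemS : l[k] ∈ PySem.Set.update PySem.Set.empty (l.take k) := by
        rw [PySem.Set.mem_update]
        exact Or.inr (hrep hklt)
      have hstep : pvStepA (PySem.Set.update PySem.Set.empty (l.take k), cnt) l[k]
          = (PySem.Set.add PySem.Set.empty l[k], cnt + 1) := by
        unfold pvStepA
        rw [if_pos]
        simp only [PySem.Set.contains_eq_listContains]
        simpa using hmemS
      have hstep' : pvStepA (PySem.Set.empty, cnt + 1) l[k]
          = (PySem.Set.add PySem.Set.empty l[k], cnt + 1) := by
        unfold pvStepA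
        rw [if_neg]
        simp [PySem.Set.empty]
      have hdroplen : (l.drop k).length ≤ n := by
        rw [List.length_drop]; omega
      have hdropsplit : l.drop k = l[k] :: l.drop (k + 1) :=
        List.drop_eq_getElem_cons hklt
      calc (l.foldl pvStepA (PySem.Set.empty, cnt)).2
          = ((l[k] :: l.drop (k + 1)).foldl pvStepA
              (PySem.Set.update PySem.Set.empty (l.take k), cnt)).2 := by
            conv_lhs => rw [hsplit]
            rw [List.foldl_append, hS]
        _ = ((l.drop (k + 1)).foldl pvStepA
              (PySem.Set.add PySem.Set.empty l[k], cnt + 1)).2 := by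
            rw [List.foldl_cons, hstep]
        _ = ((l.drop k).foldl pvStepA (PySem.Set.empty, cnt + 1)).2 := by
            rw [hdropsplit, List.foldl_cons, hstep']
        _ = pvPartsB n (l.drop k) (cnt + 1) := ih (l.drop k) hdroplen (cnt + 1)
        _ = pvPartsB (n + 1) l cnt := by
            rw [pvPartsB, ← hkdef, if_neg hke]

-- ===== VERDICT (by name: the statement is the Claim_ definition above) =====
theorem partitions_string_spec : Claim_equal_partitions_string := by
  intro s _
  unfold Spec_partitions_string partitions_string_alt
  exact (partitions_string_eq_foldA s).trans
    (foldA_eq_partsB s.toList.length s.toList (le_refl _) 1)
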